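-- pv_equiv track=rewrite | github.com/MdavidM02/Chorus-Portal-Automation_Work | utils/test_Chorus_API_tests.py | build_final_url
-- ===== SOURCE A (Python) =====
-- ENVIRONMENT_URLS = {
--     "local": "http://localhost",
--     "dev": "https://awddev.trialclient1.awdcloud.co.uk",
--     "lunate": "https://awddev.lunate.ae-bpchorus.com",
--     "prod": "https://awdprod.trialclient1.awdcloud.co.uk"
-- }
--
-- def is_valid_check(value):
--     return value not in (None, "") and str(value).strip().lower() not in ["none", "nan"]
--
-- def build_final_url(base_url, environment, test_data):
--     """
--     Replaces 'http://localhost' with environment base URL and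
--     dynamically substitutes variables like {instanceId}, {businessAreaId}, {typeId}, etc.
--     """
--     env_base = ENVIRONMENT_URLS.get(environment.lower(), ENVIRONMENT_URLS["local"])
--
--     # Replace localhost with actual environment base
--     if base_url.startswith("http://localhost"):
--         base_url = base_url.replace("http://localhost", env_base)
--
--     # Replace any placeholders in the URL with corresponding Excel values
--     for key, value in test_data.items():
--         if is_valid_check(value) and f"{{{key}}}" in base_url:
--             base_url = base_url.replace(f"{{{key}}}", str(value))
--
--     # Sanitize accidental double slashes (except after 'https://')
--     base_url = base_url.replace("://", "TEMP_PLACEHOLDER").replace("//", "/").replace("TEMP_PLACEHOLDER", "://")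
--
--     return base_url
-- ===== SOURCE B (Python) =====
-- ENVIRONMENT_URLS = {
--     "local": "http://localhost",
--     "dev": "https://awddev.trialclient1.awdcloud.co.uk",
--     "lunate": "https://awddev.lunate.ae-bpchorus.com",
--     "prod": "https://awdprod.trialclient1.awdcloud.co.uk"
-- }
--
-- def is_valid_check(value):
--     return value not in (None, "") and str(value).strip().lower() not in ["none", "nan"]
--
-- def build_final_url(base_url, environment, test_data):
--     env_base = ENVIRONMENT_URLS.get(environment.lower(), ENVIRONMENT_URLS["local"])
--     if base_url.startswith("http://localhost"):
--         base_url = base_url.replace("http://localhost", env_base)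
--
--     # Single left-to-right scan: at each '{' read up to the next '}' and
--     # substitute in place when that key has a usable value.
--     out = []
--     i = 0
--     n = len(base_url)
--     while i < n:
--         c = base_url[i]
--         if c == '{':
--             j = base_url.find('}', i + 1)
--             if j != -1:
--                 key = base_url[i + 1:j]
--                 if key in test_data and is_valid_check(test_data[key]):
--                     out.append(str(test_data[key]))
--                     i = j + 1
--                     continue
--         out.append(c)
--         i += 1
--     base_url = ''.join(out)
--
--     return base_url.replace("://", "TEMP_PLACEHOLDER").replace("//", "/").replace("TEMP_PLACEHOLDER", "://")
-- ===== Notes on version B (the rewrite author's own statement) =====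
-- stated objective: faster
-- what changed: Replaces the per-dict-key loop of whole-string str.replace rescans with a single left-to-right scan of the URL that, at each '{', reads up to the next '}' and substitutes the keyed value in place; env-prefix replace and the slash sanitize are kept as-is.
-- outside the precondition, e.g. on build_final_url('{a{m}b}', 'dev', {'m': 'X', 'aXb': 'Q'}): A returns 'Q', B returns '{aXb}'; on build_final_url('x{a}b}', 'dev', {'a}b': 'Z'}): A returns 'xZ', B returns 'x{a}b}'; on build_final_url('{a}x}', 'dev', {'a': '{b', 'bx': 'Q'}): A returns 'Q', B returns '{bx}'
import Mathlib
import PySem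

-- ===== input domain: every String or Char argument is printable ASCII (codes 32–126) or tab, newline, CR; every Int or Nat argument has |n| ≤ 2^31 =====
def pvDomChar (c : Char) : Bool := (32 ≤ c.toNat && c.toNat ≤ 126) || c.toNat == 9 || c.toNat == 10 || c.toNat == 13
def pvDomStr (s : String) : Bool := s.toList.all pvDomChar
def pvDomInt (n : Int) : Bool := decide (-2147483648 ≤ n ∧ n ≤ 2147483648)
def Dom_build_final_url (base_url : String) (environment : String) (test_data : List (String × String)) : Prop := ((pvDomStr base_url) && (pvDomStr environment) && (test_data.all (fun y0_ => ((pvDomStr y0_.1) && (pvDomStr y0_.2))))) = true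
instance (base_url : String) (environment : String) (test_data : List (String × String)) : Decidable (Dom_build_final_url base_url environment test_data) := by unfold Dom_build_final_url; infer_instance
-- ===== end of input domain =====

-- B replaces A's per-dict-key loop of whole-string replaces with one left-to-right scan of the
-- URL that substitutes each '{key}' in place (objective: faster, one pass instead of one rescan per key).

-- ===== PORT A =====
-- module constant ENVIRONMENT_URLS
def pvENVIRONMENT_URLS : PySem.Dict String String :=
  PySem.Dict.ofList
    [("local", "http://localhost"),
     ("dev", "https://awddev.trialclient1.awdcloud.co.uk"),
     ("lunate", "https://awddev.lunate.ae-bpchorus.com"),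
     ("prod", "https://awdprod.trialclient1.awdcloud.co.uk")]

-- module helper is_valid_check (on str values; 'value not in (None, "")' is 'value != ""')
def pvIsValidCheck (value : String) : Bool :=
  !(value == "") && !(["none", "nan"].contains (PySem.Str.lower (PySem.Str.strip value)))

-- ENVIRONMENT_URLS.get(environment.lower(), ENVIRONMENT_URLS["local"]); the "local" key is present,
-- so Dict.getD with an unused fallback is exact.
def build_final_url (base_url : String) (environment : String) (test_data : List (String × String)) : String :=
  let env_base := PySem.Dict.getD pvENVIRONMENT_URLS (PySem.Str.lower environment)
      (PySem.Dict.getD pvENVIRONMENT_URLS "local" "")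
  let u1 := if PySem.Str.startswith base_url "http://localhost" then
      PySem.Str.replace base_url "http://localhost" env_base else base_url
  let u2 := (PySem.Dict.ofList test_data).items.foldl
      (fun b kv =>
        if pvIsValidCheck kv.2 && PySem.Str.isIn ("{" ++ kv.1 ++ "}") b then
          PySem.Str.replace b ("{" ++ kv.1 ++ "}") kv.2
        else b) u1
  PySem.Str.replace (PySem.Str.replace (PySem.Str.replace u2 "://" "TEMP_PLACEHOLDER") "//" "/") "TEMP_PLACEHOLDER" "://"

-- ===== PORT B =====
-- the scan loop of Source B: at '{' read to the next '}' (takeWhile = find('}')), substitute in place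
def pvScanSub (d : PySem.Dict String String) : List Char → List Char
  | [] => []
  | c :: rest =>
    if c = '{' then
      let key := rest.takeWhile (fun ch => ch ≠ '}')
      if key.length < rest.length then
        match PySem.Dict.get? d (String.ofList key) with
        | some v =>
            if pvIsValidCheck v then v.toList ++ pvScanSub d (rest.drop (key.length + 1))
            else c :: pvScanSub d rest
        | none => c :: pvScanSub d rest
      else c :: pvScanSub d rest
    else c :: pvScanSub d rest
termination_by l => l.length
decreasing_by all_goals (simp [List.length_drop]; try omega)

def build_final_url_alt (base_url : String) (environment : String) (test_data : List (String × String)) : String :=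
  let env_base := PySem.Dict.getD pvENVIRONMENT_URLS (PySem.Str.lower environment)
      (PySem.Dict.getD pvENVIRONMENT_URLS "local" "")
  let u1 := if PySem.Str.startswith base_url "http://localhost" then
      PySem.Str.replace base_url "http://localhost" env_base else base_url
  let u2 := String.ofList (pvScanSub (PySem.Dict.ofList test_data) u1.toList)
  PySem.Str.replace (PySem.Str.replace (PySem.Str.replace u2 "://" "TEMP_PLACEHOLDER") "//" "/") "TEMP_PLACEHOLDER" "://"

-- ===== PRECONDITION & SPEC =====
def pvBraceFree (l : List Char) : Bool := l.all (fun c => !(c == '{') && !(c == '}'))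

-- DFA over the URL: accepts iff no second '{' occurs before the '}' closing an open '{'
def pvOkBraces : Bool → List Char → Bool
  | _, [] => true
  | inside, c :: rest =>
    if c = '{' then !inside && pvOkBraces true rest
    else if c = '}' then pvOkBraces false rest
    else pvOkBraces inside rest

-- the URL after the env-base replacement (Pre_ must speak about this string, because that
-- replacement can splice characters into a placeholder)
def pvEffUrl (base_url : String) (environment : String) : String :=
  let env_base := PySem.Dict.getD pvENVIRONMENT_URLS (PySem.Str.lower environment)
      (PySem.Dict.getD pvENVIRONMENT_URLS "local" "")
  if PySem.Str.startswith base_url "http://localhost" then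
    PySem.Str.replace base_url "http://localhost" env_base else base_url

-- Pre_ excludes inputs on which A's sequential per-key replace can substitute placeholder text that
-- only arises from the dict-iteration order of earlier insertions (an artefact a single scan does not
-- reproduce): effective URLs with a second '{' before the next '}', usable entries whose key contains
-- a brace while the URL contains '{', and usable entries whose value contains a brace while their
-- '{key}' occurs in the URL.
def Pre_build_final_url (base_url : String) (environment : String) (test_data : List (String × String)) : Prop :=
  pvOkBraces false (pvEffUrl base_url environment).toList = true ∧
  ∀ p ∈ test_data, pvIsValidCheck p.2 = true →
    (('{' ∈ (pvEffUrl base_url environment).toList → pvBraceFree p.1.toList = true) ∧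
     (PySem.Str.isIn ("{" ++ p.1 ++ "}") (pvEffUrl base_url environment) = true → pvBraceFree p.2.toList = true))

instance (base_url : String) (environment : String) (test_data : List (String × String)) : Decidable (Pre_build_final_url base_url environment test_data) := by
  unfold Pre_build_final_url; infer_instance

def pvWitness_build_final_url : String × String × (List (String × String)) :=
  ("http://localhost/api/{instanceId}/x", "dev", [("instanceId", "42")])

def Spec_build_final_url (base_url : String) (environment : String) (test_data : List (String × String)) (out : String) : Prop := out = build_final_url_alt base_url environment test_data
instance (base_url : String) (environment : String) (test_data : List (String × String)) (out : String) : Decidable (Spec_build_final_url base_url environment test_data out) := by unfold Spec_build_final_url; infer_instance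

-- ===== CLAIM (what is proved, stated in full; the proofs are below) =====
def Claim_equal_build_final_url : Prop := ∀ (base_url : String) (environment : String) (test_data : List (String × String)), Dom_build_final_url base_url environment test_data → Pre_build_final_url base_url environment test_data → Spec_build_final_url base_url environment test_data (build_final_url base_url environment test_data)

-- ===== LEMMAS AND PROOFS =====

-- ---- a recursive model of PySem.Chars.replace (for nonempty patterns) ----
def pvRep (old new : List Char) : List Char → List Char
  | [] => []
  | c :: t => if old.isPrefixOf (c :: t) then new ++ pvRep old new (t.drop (old.length - 1))
              else c :: pvRep old new t
termination_by l => l.length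
decreasing_by all_goals (simp [List.length_drop]; try omega)

theorem pvGo_eq (old new : List Char) (h : old ≠ []) :
    ∀ (fuel : Nat) (l acc : List Char), l.length ≤ fuel →
      PySem.Chars.replace.go old new fuel l acc = acc.reverse ++ pvRep old new l := by
  intro fuel
  induction fuel with
  | zero =>
    intro l acc hl
    have : l = [] := List.eq_nil_of_length_eq_zero (Nat.le_zero.mp hl)
    subst this
    simp [PySem.Chars.replace.go, pvRep]
  | succ n ih =>
    intro l acc hl
    cases l with
    | nil => simp [PySem.Chars.replace.go, pvRep]
    | cons c t =>
      rw [PySem.Chars.replace.go]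
      by_cases hp : old.isPrefixOf (c :: t) = true
      · simp only [hp, if_true]
        obtain ⟨o, os, rfl⟩ : ∃ o os, old = o :: os := by
          cases old with | nil => exact absurd rfl h | cons a b => exact ⟨a, b, rfl⟩
        have hdrop : List.drop (o :: os).length (c :: t) = t.drop ((o :: os).length - 1) := by
          simp [List.length_cons]
        have hl' : t.length ≤ n := by simp [List.length_cons] at hl; omega
        rw [hdrop, ih _ _ (by simp [List.length_drop]; omega)]
        simp [pvRep, hp, hdrop]
      · simp only [hp, if_false]
        have hl' : t.length ≤ n := by simp [List.length_cons] at hl; omega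
        rw [ih _ _ hl']
        simp [pvRep, hp]

theorem pvReplace_eq (old new s : List Char) (h : old ≠ []) :
    PySem.Chars.replace s old new = pvRep old new s := by
  have he : old.isEmpty = false := by simp [List.isEmpty_iff, h]
  rw [PySem.Chars.replace, he]
  simpa using pvGo_eq old new h s.length s [] (le_refl _)

theorem pvRep_cons_no (old new : List Char) (c : Char) (t : List Char)
    (h : old.isPrefixOf (c :: t) = false) :
    pvRep old new (c :: t) = c :: pvRep old new t := by
  simp [pvRep, h]

theorem pvRep_prefix (old new t : List Char) (h : old ≠ []) :
    pvRep old new (old ++ t) = new ++ pvRep old new t := by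
  obtain ⟨o, os, rfl⟩ : ∃ o os, old = o :: os := by
    cases old with | nil => exact absurd rfl h | cons a b => exact ⟨a, b, rfl⟩
  have hp : (o :: os).isPrefixOf ((o :: os) ++ t) = true := by
    simp [List.isPrefixOf_iff_prefix]
  have hd : ((os ++ t).drop ((o :: os).length - 1)) = t := by
    simp [List.drop_left]
  simp only [List.cons_append, pvRep, List.cons_append ▸ hp]
  rw [if_pos (by simpa using hp)]
  simp [hd]

theorem pvRep_append_txt (p new t R : List Char) (ht : '{' ∉ t) :
    pvRep ('{' :: p) new (t ++ R) = t ++ pvRep ('{' :: p) new R := by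
  induction t with
  | nil => simp
  | cons c t' ih =>
    have hc : c ≠ '{' := fun hh => ht (by simp [hh])
    have hp : ('{' :: p).isPrefixOf (c :: (t' ++ R)) = false := by
      simp [List.isPrefixOf, Ne.symm hc]
    rw [List.cons_append, pvRep_cons_no _ _ _ _ hp, ih (fun hm => ht (by simp [hm]))]
    simp

-- ---- segments ----
inductive PvSeg where
  | txt : List Char → PvSeg
  | span : List Char → PvSeg
  | tail : List Char → PvSeg
deriving DecidableEq, Repr

def pvRenderSeg : PvSeg → List Char
  | .txt t => t
  | .span k => '{' :: (k ++ ['}'])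
  | .tail u => '{' :: u

def pvRender (segs : List PvSeg) : List Char := segs.flatMap pvRenderSeg

inductive PvWF : List PvSeg → Prop where
  | nil : PvWF []
  | tl (u : List Char) : pvBraceFree u = true → PvWF [.tail u]
  | txt (t : List Char) (rest : List PvSeg) : '{' ∉ t → PvWF rest → PvWF (.txt t :: rest)
  | span (k : List Char) (rest : List PvSeg) : pvBraceFree k = true → PvWF rest → PvWF (.span k :: rest)

def pvParse : List Char → List PvSeg
  | [] => []
  | c :: rest =>
    if c = '{' then
      let k := rest.takeWhile (fun ch => ch ≠ '}')
      if k.length < rest.length then .span k :: pvParse (rest.drop (k.length + 1))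
      else [.tail rest]
    else .txt [c] :: pvParse rest
termination_by l => l.length
decreasing_by all_goals (simp [List.length_drop]; try omega)

theorem pvTW (rest : List Char) :
    rest.takeWhile (fun ch => ch ≠ '}') = rest ∨
    rest = rest.takeWhile (fun ch => ch ≠ '}') ++ '}' :: rest.drop ((rest.takeWhile (fun ch => ch ≠ '}')).length + 1) := by
  induction rest with
  | nil => exact Or.inl rfl
  | cons c r ih =>
    by_cases hc : c = '}'
    · subst hc
      right
      simp [List.takeWhile]
    · rw [List.takeWhile_cons_of_pos (by simp [hc])]
      rcases ih with h | h
      · exact Or.inl (by rw [h])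
      · right
        simp only [List.length_cons, List.drop_succ_cons, List.cons_append]
        exact congrArg (c :: ·) h
theorem pvTW_no_close (l : List Char) (x : Char) (hx : x ∈ l.takeWhile (fun ch => ch ≠ '}')) :
    x ≠ '}' := by
  have := List.mem_takeWhile_imp hx
  simpa using this
theorem pvBraceFree_of (l : List Char) (h1 : '{' ∉ l) (h2 : '}' ∉ l) : pvBraceFree l = true := by
  simp only [pvBraceFree, List.all_eq_true]
  intro c hc
  simp only [Bool.and_eq_true, Bool.not_eq_eq_eq_not, Bool.not_true, beq_eq_false_iff_ne]
  exact ⟨fun e => h1 (e ▸ hc), fun e => h2 (e ▸ hc)⟩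
theorem pvBraceFree_no_open (l : List Char) (h : pvBraceFree l = true) : '{' ∉ l := by
  simp only [pvBraceFree, List.all_eq_true] at h
  intro hm
  simpa using h _ hm
theorem pvBraceFree_no_close (l : List Char) (h : pvBraceFree l = true) : '}' ∉ l := by
  simp only [pvBraceFree, List.all_eq_true] at h
  intro hm
  simpa using h _ hm
theorem pvOk_step_out (c : Char) (rest : List Char) (hc : c ≠ '{')
    (h : pvOkBraces false (c :: rest) = true) : pvOkBraces false rest = true := by
  by_cases h2 : c = '}' <;> simp_all [pvOkBraces]
theorem pvOk_step_in (rest : List Char) (h : pvOkBraces false ('{' :: rest) = true) :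
    pvOkBraces true rest = true := by
  simpa [pvOkBraces] using h
theorem pvOk_inside (k : List Char) : ∀ (r' : List Char), '}' ∉ k →
    pvOkBraces true (k ++ '}' :: r') = true → ('{' ∉ k ∧ pvOkBraces false r' = true) := by
  induction k with
  | nil => intro r' _ h; simpa [pvOkBraces] using h
  | cons c k' ih =>
    intro r' hk h
    have hc : c ≠ '}' := fun e => hk (by simp [e])
    have hc2 : c ≠ '{' := by
      intro e
      subst e
      simp [pvOkBraces] at h
    have h' : pvOkBraces true (k' ++ '}' :: r') = true := by
      simpa [pvOkBraces, hc, hc2] using h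
    obtain ⟨ho, hr⟩ := ih r' (fun hm => hk (by simp [hm])) h'
    exact ⟨by simp [ho, Ne.symm hc2], hr⟩
theorem pvOk_inside_noclose (u : List Char) (hu : '}' ∉ u) (h : pvOkBraces true u = true) :
    '{' ∉ u := by
  induction u with
  | nil => simp
  | cons c u' ih =>
    have hc : c ≠ '}' := fun e => hu (by simp [e])
    have hc2 : c ≠ '{' := by
      intro e; subst e; simp [pvOkBraces] at h
    have h' : pvOkBraces true u' = true := by simpa [pvOkBraces, hc, hc2] using h
    simp only [List.mem_cons, not_or]
    exact ⟨Ne.symm hc2, ih (fun hm => hu (by simp [hm])) h'⟩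

theorem pvRender_parse (s : List Char) : pvRender (pvParse s) = s := by
  induction s using pvParse.induct with
  | case1 => simp [pvParse, pvRender]
  | case2 rest k hlt ih =>
    rw [pvParse]
    rw [if_pos rfl, if_pos hlt]
    rcases pvTW rest with h | h
    · have hlt' : (List.takeWhile (fun ch => decide (ch ≠ '}')) rest).length < rest.length := hlt
      rw [h] at hlt'
      omega
    · simp only [pvRender, List.flatMap_cons, pvRenderSeg]
      rw [pvRender] at ih
      rw [ih]
      conv_rhs => rw [h]
      simp only [List.cons_append, List.append_assoc, List.nil_append, List.singleton_append]
      rfl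
  | case3 rest k hnlt =>
    rw [pvParse]
    rw [if_pos rfl, if_neg hnlt]
    simp [pvRender, pvRenderSeg]
  | case4 c rest hc ih =>
    rw [pvParse]
    rw [if_neg hc]
    simp [pvRender, pvRenderSeg]
    simpa [pvRender] using ih

theorem pvWF_parse (s : List Char) : pvOkBraces false s = true → PvWF (pvParse s) := by
  induction s using pvParse.induct with
  | case1 => intro _; rw [pvParse]; exact PvWF.nil
  | case2 rest k hlt ih =>
    intro h
    rw [pvParse, if_pos rfl, if_pos hlt]
    rcases pvTW rest with hd | hd
    · have hlt' : (List.takeWhile (fun ch => decide (ch ≠ '}')) rest).length < rest.length := hlt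
      rw [hd] at hlt'
      omega
    · have hin : pvOkBraces true rest = true := pvOk_step_in rest h
      have hnc : '}' ∉ rest.takeWhile (fun ch => decide (ch ≠ '}')) := by
        intro hm
        exact pvTW_no_close rest '}' (by simpa using hm) rfl
      rw [hd] at hin
      obtain ⟨hno, hrest⟩ := pvOk_inside _ _ hnc hin
      exact PvWF.span _ _ (pvBraceFree_of _ hno hnc) (ih hrest)
  | case3 rest k hnlt =>
    intro h
    rw [pvParse, if_pos rfl, if_neg hnlt]
    have hk : rest.takeWhile (fun ch => decide (ch ≠ '}')) = rest := by
      rcases pvTW rest with hd | hd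
      · exact hd
      · exfalso
        have hlen : rest.length = (List.takeWhile (fun ch => decide (ch ≠ '}')) rest).length + 1 + (List.drop ((List.takeWhile (fun ch => decide (ch ≠ '}')) rest).length + 1) rest).length := by
          conv_lhs => rw [hd]
          simp only [List.length_append, List.length_cons]
          omega
        exact hnlt (show (List.takeWhile (fun ch => decide (ch ≠ '}')) rest).length < rest.length by omega)
    have hnc : '}' ∉ rest := by
      intro hm
      exact pvTW_no_close rest '}' (by rw [hk]; exact hm) rfl
    have hin : pvOkBraces true rest = true := pvOk_step_in rest h
    exact PvWF.tl _ (pvBraceFree_of _ (pvOk_inside_noclose rest hnc hin) hnc)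
  | case4 c rest hc ih =>
    intro h
    rw [pvParse, if_neg hc]
    exact PvWF.txt _ _ (by simp [Ne.symm hc]) (ih (pvOk_step_out c rest hc h))

theorem pvMem_render_infix (g : PvSeg) (segs : List PvSeg) (h : g ∈ segs) :
    pvRenderSeg g <:+: pvRender segs := by
  induction segs with
  | nil => cases h
  | cons a rest ih =>
    rcases List.mem_cons.mp h with rfl | hm
    · exact ((List.prefix_append (pvRenderSeg g) (pvRender rest)).isInfix)
    · have := ih hm
      calc pvRenderSeg g <:+: pvRender rest := this
        _ <:+: pvRender (a :: rest) := (List.suffix_append (pvRenderSeg a) (pvRender rest)).isInfix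

theorem pvKey_prefix_eq (k : List Char) : ∀ (k' R : List Char), pvBraceFree k = true → pvBraceFree k' = true →
    (k ++ ['}']) <+: (k' ++ '}' :: R) → k = k' := by
  induction k with
  | nil =>
    intro k' R _ hk' h
    cases k' with
    | nil => rfl
    | cons x k'' =>
      exfalso
      simp only [List.nil_append, List.cons_append] at h
      obtain ⟨he, -⟩ := (List.cons_prefix_cons.mp h)
      exact pvBraceFree_no_close _ hk' (he ▸ List.mem_cons_self)
  | cons a k2 ih =>
    intro k' R hk hk' h
    cases k' with
    | nil =>
      exfalso
      simp only [List.cons_append, List.nil_append] at h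
      obtain ⟨he, -⟩ := (List.cons_prefix_cons.mp h)
      exact pvBraceFree_no_close _ hk (he ▸ List.mem_cons_self)
    | cons b k2' =>
      simp only [List.cons_append] at h
      obtain ⟨he, hp⟩ := List.cons_prefix_cons.mp h
      have h2 : pvBraceFree k2 = true := by
        simp only [pvBraceFree, List.all_cons, Bool.and_eq_true] at hk
        exact hk.2
      have h2' : pvBraceFree k2' = true := by
        simp only [pvBraceFree, List.all_cons, Bool.and_eq_true] at hk'
        exact hk'.2
      rw [he, ih k2' R h2 h2' hp]

theorem pvInfix_strip (p t : List Char) : ∀ (R : List Char), '{' ∉ t → ('{' :: p) <:+: (t ++ R) →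
    ('{' :: p) <:+: R := by
  induction t with
  | nil => intro R _ h; simpa using h
  | cons c t' ih =>
    intro R ht h
    rcases List.infix_cons_iff.mp (by simpa using h) with hp | hi
    · exfalso
      obtain ⟨he, -⟩ := List.cons_prefix_cons.mp hp
      exact ht (List.mem_cons.mpr (Or.inl he))
    · exact ih R (fun hm => ht (by simp [hm])) hi

theorem pvOcc (segs : List PvSeg) (hw : PvWF segs) (k : List Char) (hk : pvBraceFree k = true)
    (h : ('{' :: (k ++ ['}'])) <:+: pvRender segs) : PvSeg.span k ∈ segs := by
  induction hw with
  | nil => simp [pvRender, List.infix_nil] at h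
  | tl u hu =>
    exfalso
    have hru : pvRender [PvSeg.tail u] = '{' :: u := by simp [pvRender, pvRenderSeg]
    rw [hru] at h
    rcases List.infix_cons_iff.mp h with hp | hi
    · obtain ⟨-, hp2⟩ := List.cons_prefix_cons.mp hp
      exact pvBraceFree_no_close _ hu (hp2.subset (by simp))
    · have := pvInfix_strip (k ++ ['}']) u [] (pvBraceFree_no_open _ hu) (by simpa using hi)
      simp [List.infix_nil] at this
  | txt t rest htf hwr ih =>
    have hrt : pvRender (PvSeg.txt t :: rest) = t ++ pvRender rest := by simp [pvRender, pvRenderSeg]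
    rw [hrt] at h
    exact List.mem_cons_of_mem _ (ih (pvInfix_strip _ t _ htf h))
  | span k' rest hk' hwr ih =>
    have hrs : pvRender (PvSeg.span k' :: rest) = '{' :: (k' ++ '}' :: pvRender rest) := by
      simp [pvRender, pvRenderSeg]
    rw [hrs] at h
    rcases List.infix_cons_iff.mp h with hp | hi
    · obtain ⟨-, hp2⟩ := List.cons_prefix_cons.mp hp
      rw [pvKey_prefix_eq k k' _ hk hk' hp2]
      exact List.mem_cons_self
    · have h2 := pvInfix_strip (k ++ ['}']) k' _ (pvBraceFree_no_open _ hk') hi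
      rcases List.infix_cons_iff.mp h2 with hp3 | hi3
      · exfalso
        obtain ⟨he, -⟩ := List.cons_prefix_cons.mp hp3
        exact absurd he (by decide)
      · exact List.mem_cons_of_mem _ (ih hi3)

def pvSubst1 (k v : List Char) : PvSeg → PvSeg
  | .span k' => if k' = k then .txt v else .span k'
  | g => g

theorem pvRep_render (k v : List Char) (hk : pvBraceFree k = true) (segs : List PvSeg)
    (hw : PvWF segs) :
    pvRep ('{' :: (k ++ ['}'])) v (pvRender segs) = pvRender (segs.map (pvSubst1 k v)) := by
  induction hw with
  | nil => simp [pvRender, pvRep]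
  | tl u hu =>
    have hru : pvRender [PvSeg.tail u] = '{' :: u := by simp [pvRender, pvRenderSeg]
    have hp : ('{' :: (k ++ ['}'])).isPrefixOf ('{' :: u) = false := by
      rw [Bool.eq_false_iff]
      intro hpp
      obtain ⟨-, hp2⟩ := List.cons_prefix_cons.mp (List.isPrefixOf_iff_prefix.mp hpp)
      exact pvBraceFree_no_close _ hu (hp2.subset (by simp))
    rw [hru, pvRep_cons_no _ _ _ _ hp]
    have := pvRep_append_txt (k ++ ['}']) v u [] (pvBraceFree_no_open _ hu)
    simp only [List.append_nil] at this
    rw [this]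
    simp [pvRep, pvRender, pvRenderSeg, pvSubst1]
  | txt t rest htf hwr ih =>
    have hrt : pvRender (PvSeg.txt t :: rest) = t ++ pvRender rest := by simp [pvRender, pvRenderSeg]
    rw [hrt, pvRep_append_txt _ _ _ _ htf, ih]
    simp [pvRender, pvRenderSeg, pvSubst1]
  | span k' rest hk' hwr ih =>
    have hrs : pvRender (PvSeg.span k' :: rest) = ('{' :: (k' ++ ['}'])) ++ pvRender rest := by
      simp [pvRender, pvRenderSeg]
    rw [hrs]
    by_cases he : k' = k
    · subst he
      rw [pvRep_prefix _ _ _ (by simp), ih]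
      simp [pvRender, pvRenderSeg, pvSubst1]
    · have hp : ('{' :: (k ++ ['}'])).isPrefixOf ('{' :: (k' ++ '}' :: pvRender rest)) = false := by
        rw [Bool.eq_false_iff]
        intro hpp
        obtain ⟨-, hp2⟩ := List.cons_prefix_cons.mp (List.isPrefixOf_iff_prefix.mp hpp)
        exact he (pvKey_prefix_eq k k' _ hk hk' hp2).symm
      have hshape : ('{' :: (k' ++ ['}'])) ++ pvRender rest = '{' :: (k' ++ '}' :: pvRender rest) := by
        simp
      have hp2 : ('{' :: (k ++ ['}'])).isPrefixOf ('}' :: pvRender rest) = false := by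
        rw [Bool.eq_false_iff]
        intro hpp
        obtain ⟨he2, -⟩ := List.cons_prefix_cons.mp (List.isPrefixOf_iff_prefix.mp hpp)
        exact absurd he2 (by decide)
      rw [hshape, pvRep_cons_no _ _ _ _ hp,
          pvRep_append_txt _ _ _ _ (pvBraceFree_no_open _ hk'),
          pvRep_cons_no _ _ _ _ hp2, ih]
      simp [pvRender, pvRenderSeg, pvSubst1, he]

theorem pvWF_subst1 (k v : List Char) (segs : List PvSeg) (hw : PvWF segs) (hv : '{' ∉ v) :
    PvWF (segs.map (pvSubst1 k v)) := by
  induction hw with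
  | nil => exact PvWF.nil
  | tl u hu => exact PvWF.tl u hu
  | txt t rest htf hwr ih => exact PvWF.txt t _ htf ih
  | span k' rest hk' hwr ih =>
    by_cases he : k' = k
    · simpa [pvSubst1, he] using PvWF.txt v _ hv ih
    · simpa [pvSubst1, he] using PvWF.span k' _ hk' ih

-- ---- the resolved form both programs compute ----
def pvResolveKey : List (String × String) → List Char → PvSeg
  | [], k => .span k
  | p :: E, k => if (p.1.toList == k) && pvIsValidCheck p.2 then .txt p.2.toList else pvResolveKey E k

def pvResolveSeg (E : List (String × String)) : PvSeg → PvSeg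
  | .span k => pvResolveKey E k
  | g => g

def pvResolveSegD (d : PySem.Dict String String) : PvSeg → PvSeg
  | .span k =>
    match PySem.Dict.get? d (String.ofList k) with
    | some v => if pvIsValidCheck v then .txt v.toList else .span k
    | none => .span k
  | g => g

def pvStepL (b : List Char) (p : String × String) : List Char :=
  if pvIsValidCheck p.2 && PySem.Chars.isIn ('{' :: (p.1.toList ++ ['}'])) b then
    PySem.Chars.replace b ('{' :: (p.1.toList ++ ['}'])) p.2.toList
  else b

theorem pvFold_toList (E : List (String × String)) : ∀ (u : String),
    (E.foldl (fun b kv =>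
        if pvIsValidCheck kv.2 && PySem.Str.isIn ("{" ++ kv.1 ++ "}") b then
          PySem.Str.replace b ("{" ++ kv.1 ++ "}") kv.2
        else b) u).toList = E.foldl pvStepL u.toList := by
  induction E with
  | nil => intro u; simp
  | cons p E ih =>
    intro u
    simp only [List.foldl_cons]
    have hpat : ("{" ++ p.1 ++ "}").toList = '{' :: (p.1.toList ++ ['}']) := by
      simp [String.toList_append]
    by_cases hg : (pvIsValidCheck p.2 && PySem.Str.isIn ("{" ++ p.1 ++ "}") u) = true
    · have hg' : (pvIsValidCheck p.2 && PySem.Chars.isIn ('{' :: (p.1.toList ++ ['}'])) u.toList) = true := by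
        rw [← hpat, ← PySem.Str.isIn_eq]
        exact hg
      rw [hg, ih]
      simp only [pvStepL, hg', if_true]
      rw [PySem.Str.toList_replace, hpat]
    · have hg' : (pvIsValidCheck p.2 && PySem.Chars.isIn ('{' :: (p.1.toList ++ ['}'])) u.toList) = false := by
        rw [← hpat, ← PySem.Str.isIn_eq]
        exact Bool.eq_false_iff.mpr hg
      rw [Bool.eq_false_iff.mpr hg, ih]
      simp only [pvStepL, hg', if_false]
      simp

theorem pvResolveSeg_nil (g : PvSeg) : pvResolveSeg [] g = g := by
  cases g <;> rfl

theorem pvResolveSeg_skip (p : String × String) (E : List (String × String)) (g : PvSeg)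
    (hval : pvIsValidCheck p.2 = false) : pvResolveSeg (p :: E) g = pvResolveSeg E g := by
  cases g <;> simp [pvResolveSeg, pvResolveKey, hval]

theorem pvResolveSeg_notmem (p : String × String) (E : List (String × String)) (g : PvSeg)
    (hg : ∀ k : List Char, g = PvSeg.span k → p.1.toList ≠ k) :
    pvResolveSeg (p :: E) g = pvResolveSeg E g := by
  cases g with
  | txt t => rfl
  | tail u => rfl
  | span k =>
    simp only [pvResolveSeg, pvResolveKey]
    rw [if_neg]
    simp only [Bool.and_eq_true, beq_iff_eq, not_and]
    intro he
    exact absurd he (hg k rfl)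

theorem pvResolve_subst (p : String × String) (E : List (String × String)) (g : PvSeg)
    (hval : pvIsValidCheck p.2 = true) :
    pvResolveSeg E (pvSubst1 p.1.toList p.2.toList g) = pvResolveSeg (p :: E) g := by
  cases g with
  | txt t => rfl
  | tail u => rfl
  | span k =>
    by_cases he : k = p.1.toList
    · simp [pvSubst1, he, pvResolveSeg, pvResolveKey, hval]
    · simp only [pvSubst1, if_neg he, pvResolveSeg, pvResolveKey]
      rw [if_neg]
      simp only [Bool.and_eq_true, beq_iff_eq, not_and]
      intro h2
      exact absurd h2.symm he

theorem pvSubst1_span_mem (k key v : List Char) (segs : List PvSeg)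
    (h : PvSeg.span k ∈ segs.map (pvSubst1 key v)) : PvSeg.span k ∈ segs := by
  obtain ⟨g, hg, he⟩ := List.mem_map.mp h
  cases g with
  | txt t => simp [pvSubst1] at he
  | tail u => simp [pvSubst1] at he
  | span k' =>
    by_cases h2 : k' = key
    · simp [pvSubst1, h2] at he
    · simp only [pvSubst1, if_neg h2] at he
      rwa [← he]

theorem pvFold (url0 : List Char) :
    ∀ (E : List (String × String)) (segs : List PvSeg), PvWF segs →
    (∀ p ∈ E, pvIsValidCheck p.2 = true →
        pvBraceFree p.1.toList = true ∧
        (('{' :: (p.1.toList ++ ['}'])) <:+: url0 → pvBraceFree p.2.toList = true)) →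
    (∀ k : List Char, PvSeg.span k ∈ segs → ('{' :: (k ++ ['}'])) <:+: url0) →
    E.foldl pvStepL (pvRender segs) = pvRender (segs.map (pvResolveSeg E)) := by
  intro E
  induction E with
  | nil =>
    intro segs _ _ _
    rw [List.foldl_nil, List.map_congr_left (fun g _ => pvResolveSeg_nil g)]
    simp
  | cons p E ih =>
    intro segs hw hE hS
    rw [List.foldl_cons]
    by_cases hval : pvIsValidCheck p.2 = true
    · have hk : pvBraceFree p.1.toList = true := (hE p (by simp) hval).1
      by_cases hin : PySem.Chars.isIn ('{' :: (p.1.toList ++ ['}'])) (pvRender segs) = true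
      · -- the pattern occurs: it sits exactly at the spans with this key
        have hinf : ('{' :: (p.1.toList ++ ['}'])) <:+: pvRender segs :=
          (PySem.Chars.isIn_iff_infix _ _).mp hin
        have hmem : PvSeg.span p.1.toList ∈ segs := pvOcc segs hw _ hk hinf
        have hv : pvBraceFree p.2.toList = true := (hE p (by simp) hval).2 (hS _ hmem)
        have hstep : pvStepL (pvRender segs) p = pvRender (segs.map (pvSubst1 p.1.toList p.2.toList)) := by
          unfold pvStepL
          rw [if_pos (by simp [hval, hin]), pvReplace_eq _ _ _ (by simp),
              pvRep_render _ _ hk segs hw]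
        rw [hstep, ih (segs.map (pvSubst1 p.1.toList p.2.toList))
              (pvWF_subst1 _ _ segs hw (pvBraceFree_no_open _ hv))
              (fun q hq hvq => hE q (by simp [hq]) hvq)
              (fun k hk2 => hS k (pvSubst1_span_mem _ _ _ _ hk2)),
            List.map_map]
        congr 1
        exact List.map_congr_left (fun g _ => pvResolve_subst p E g hval)
      · have hstep : pvStepL (pvRender segs) p = pvRender segs := by
          unfold pvStepL
          rw [if_neg]
          simp [Bool.eq_false_iff.mpr hin]
        rw [hstep, ih segs hw (fun q hq hvq => hE q (by simp [hq]) hvq) hS]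
        congr 1
        apply List.map_congr_left
        intro g hg
        refine (pvResolveSeg_notmem p E g ?_).symm
        rintro k rfl he
        subst he
        exact hin ((PySem.Chars.isIn_iff_infix _ _).mpr
          (by simpa [pvRenderSeg] using pvMem_render_infix _ segs hg))
    · have hval' : pvIsValidCheck p.2 = false := Bool.eq_false_iff.mpr hval
      have hstep : pvStepL (pvRender segs) p = pvRender segs := by
        unfold pvStepL
        simp [hval']
      rw [hstep, ih segs hw (fun q hq hvq => hE q (by simp [hq]) hvq) hS]
      congr 1
      exact (List.map_congr_left (fun g _ => (pvResolveSeg_skip p E g hval').symm))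

theorem pvScan_txt (d : PySem.Dict String String) (t R : List Char) (ht : '{' ∉ t) :
    pvScanSub d (t ++ R) = t ++ pvScanSub d R := by
  induction t with
  | nil => simp
  | cons c t' ih =>
    have hc : ¬ c = '{' := fun e => ht (by simp [e])
    rw [List.cons_append, pvScanSub, if_neg hc, ih (fun hm => ht (by simp [hm]))]
    rfl

theorem pvTW_app (k : List Char) (R : List Char) (hk : '}' ∉ k) :
    (k ++ '}' :: R).takeWhile (fun ch => ch ≠ '}') = k := by
  induction k with
  | nil => simp [List.takeWhile]
  | cons c k' ih =>
    have hc : c ≠ '}' := fun e => hk (by simp [e])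
    rw [List.cons_append, List.takeWhile_cons_of_pos (by simp [hc]),
        ih (fun hm => hk (by simp [hm]))]

theorem pvTW_self (u : List Char) (hu : '}' ∉ u) :
    u.takeWhile (fun ch => ch ≠ '}') = u := by
  apply List.takeWhile_eq_self_iff.mpr
  intro c hc
  simp only [ne_eq, decide_eq_true_eq]
  intro e
  exact hu (e ▸ hc)

theorem pvScan_render (d : PySem.Dict String String) (segs : List PvSeg) (hw : PvWF segs) :
    pvScanSub d (pvRender segs) = pvRender (segs.map (pvResolveSegD d)) := by
  induction hw with
  | nil => simp [pvRender, pvScanSub]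
  | tl u hu =>
    have hru : pvRender [PvSeg.tail u] = '{' :: u := by simp [pvRender, pvRenderSeg]
    rw [hru, pvScanSub, if_pos rfl]
    rw [pvTW_self u (pvBraceFree_no_close _ hu)]
    rw [if_neg (by omega)]
    have := pvScan_txt d u [] (pvBraceFree_no_open _ hu)
    simp only [List.append_nil] at this
    rw [this]
    simp [pvScanSub, pvRender, pvRenderSeg, pvResolveSegD]
  | txt t rest htf hwr ih =>
    have hrt : pvRender (PvSeg.txt t :: rest) = t ++ pvRender rest := by simp [pvRender, pvRenderSeg]
    rw [hrt, pvScan_txt d t _ htf, ih]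
    simp [pvRender, pvRenderSeg, pvResolveSegD]
  | span k rest hk hwr ih =>
    have hrs : pvRender (PvSeg.span k :: rest) = '{' :: (k ++ '}' :: pvRender rest) := by
      simp [pvRender, pvRenderSeg]
    rw [hrs, pvScanSub, if_pos rfl]
    have htw : (k ++ '}' :: pvRender rest).takeWhile (fun ch => ch ≠ '}') = k :=
      pvTW_app k _ (pvBraceFree_no_close _ hk)
    rw [htw]
    rw [if_pos (by simp)]
    have hdrop : (k ++ '}' :: pvRender rest).drop (k.length + 1) = pvRender rest := by
      have : k ++ '}' :: pvRender rest = (k ++ ['}']) ++ pvRender rest := by simp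
      rw [this, List.drop_left' (by simp)]
    rw [hdrop]
    have hstep : pvScanSub d (k ++ '}' :: pvRender rest) = k ++ '}' :: pvScanSub d (pvRender rest) := by
      rw [pvScan_txt d k _ (pvBraceFree_no_open _ hk), pvScanSub, if_neg (by decide)]
    simp only [pvRender] at ih hstep
    cases hg : PySem.Dict.get? d (String.ofList k) with
    | some v =>
      by_cases hv : pvIsValidCheck v = true
      · simp [hv, ih, pvRender, pvRenderSeg, pvResolveSegD, hg]
      · simp [Bool.eq_false_iff.mpr hv, hstep, ih, pvRender, pvRenderSeg, pvResolveSegD, hg]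
    | none =>
      simp [hstep, ih, pvRender, pvRenderSeg, pvResolveSegD, hg]

theorem pvRK_none (l : List (String × String)) (k : List Char)
    (h : ∀ q ∈ l, q.1.toList ≠ k) : pvResolveKey l k = PvSeg.span k := by
  induction l with
  | nil => rfl
  | cons q l ih =>
    simp only [pvResolveKey]
    rw [if_neg (by simp [h q (by simp)])]
    exact ih (fun r hr => h r (by simp [hr]))

theorem pvRK_eq (l : List (String × String)) (k : List Char)
    (hnd : (l.map Prod.fst).Nodup) :
    pvResolveKey l k =
      (match (List.find? (fun p => p.1 == String.ofList k) l).map Prod.snd with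
        | some v => if pvIsValidCheck v = true then PvSeg.txt v.toList else PvSeg.span k
        | none => PvSeg.span k) := by
  induction l with
  | nil => rfl
  | cons p l ih =>
    have hnd' : p.1 ∉ l.map Prod.fst ∧ (l.map Prod.fst).Nodup :=
      List.nodup_cons.mp (show (p.1 :: l.map Prod.fst).Nodup by simpa using hnd)
    by_cases hpk : p.1.toList = k
    · have hpk' : p.1 = String.ofList k := by
        rw [← hpk]
        simp
      have hfind : List.find? (fun q => q.1 == String.ofList k) (p :: l) = some p := by
        simp [List.find?_cons_of_pos, hpk']
      rw [hfind]
      by_cases hv : pvIsValidCheck p.2 = true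
      · simp only [pvResolveKey]
        rw [if_pos (by simp [hpk, hv])]
        simp [hv]
      · simp only [pvResolveKey]
        rw [if_neg (by simp [Bool.eq_false_iff.mpr hv])]
        simp only [Option.map_some, Bool.eq_false_iff.mpr hv, Bool.false_eq_true, if_false]
        apply pvRK_none
        intro q hq he
        have : q.1 = p.1 := by
          rw [hpk', ← he]
          simp
        exact hnd'.1 (this ▸ List.mem_map_of_mem hq)
    · have hfind : List.find? (fun q => q.1 == String.ofList k) (p :: l) =
          List.find? (fun q => q.1 == String.ofList k) l := by
        apply List.find?_cons_of_neg
        intro hbe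
        exact hpk (by rw [eq_of_beq hbe]; simp)
      rw [hfind]
      simp only [pvResolveKey]
      rw [if_neg (by simp [hpk])]
      exact ih hnd'.2

theorem pvResolve_items (d : PySem.Dict String String) (hnd : (d.items.map Prod.fst).Nodup)
    (g : PvSeg) : pvResolveSeg d.items g = pvResolveSegD d g := by
  cases g with
  | txt t => rfl
  | tail u => rfl
  | span k =>
    show pvResolveKey d.items k = _
    rw [pvRK_eq d.items k hnd]
    rfl

theorem pvItems_sub_aux (l : List (String × String)) :
    ∀ (d : PySem.Dict String String) (p : String × String),
    p ∈ (List.foldl (fun acc q => acc.insert q.1 q.2) d l).items → p ∈ d.items ∨ p ∈ l := by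
  induction l with
  | nil => intro d p h; exact Or.inl h
  | cons q l ih =>
    intro d p h
    rcases ih (d.insert q.1 q.2) p h with hd | hl
    · rw [PySem.Dict.items_insert] at hd
      by_cases hc : d.contains q.1 = true
      · rw [if_pos hc] at hd
        obtain ⟨r, hr, he⟩ := List.mem_map.mp hd
        by_cases h1 : (r.1 == q.1) = true
        · right
          rw [if_pos h1] at he
          simp [← he]
        · left
          rw [if_neg h1] at he
          rwa [← he]
      · rw [if_neg hc] at hd
        rcases List.mem_append.mp hd with h1 | h2
        · exact Or.inl h1
        · right
          simp only [List.mem_singleton] at h2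
          simp [h2]
    · exact Or.inr (by simp [hl])

theorem pvItems_sub (l : List (String × String)) (p : String × String)
    (h : p ∈ (PySem.Dict.ofList l).items) : p ∈ l := by
  rcases pvItems_sub_aux l PySem.Dict.empty p h with h1 | h2
  · simp [PySem.Dict.empty] at h1
  · exact h2



theorem pvFold_no_open (E : List (String × String)) : ∀ (s : List Char), '{' ∉ s →
    E.foldl pvStepL s = s := by
  induction E with
  | nil => intro s _; rfl
  | cons p E ih =>
    intro s hs
    have hstep : pvStepL s p = s := by
      unfold pvStepL
      have : PySem.Chars.isIn ('{' :: (p.1.toList ++ ['}'])) s = false := by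
        rw [Bool.eq_false_iff]
        intro hin
        exact hs (((PySem.Chars.isIn_iff_infix _ _).mp hin).subset (by simp))
      simp [this]
    rw [List.foldl_cons, hstep]
    exact ih s hs

-- ===== VERDICT (by name: the statement is the Claim_ definition above) =====
theorem build_final_url_spec : Claim_equal_build_final_url := by
  intro base_url environment test_data _ hpre
  obtain ⟨hok, hall⟩ := hpre
  unfold Spec_build_final_url
  have key : ∀ u : String, pvOkBraces false u.toList = true →
      (∀ p ∈ test_data, pvIsValidCheck p.2 = true →
        ('{' ∈ u.toList → pvBraceFree p.1.toList = true) ∧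
        (PySem.Str.isIn ("{" ++ p.1 ++ "}") u = true → pvBraceFree p.2.toList = true)) →
      (PySem.Dict.ofList test_data).items.foldl
        (fun b kv =>
          if pvIsValidCheck kv.2 && PySem.Str.isIn ("{" ++ kv.1 ++ "}") b then
            PySem.Str.replace b ("{" ++ kv.1 ++ "}") kv.2
          else b) u =
      String.ofList (pvScanSub (PySem.Dict.ofList test_data) u.toList) := by
    intro u hoku halls
    have h1 := pvFold_toList (PySem.Dict.ofList test_data).items u
    suffices hs : (PySem.Dict.ofList test_data).items.foldl pvStepL u.toList =
        pvScanSub (PySem.Dict.ofList test_data) u.toList by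
      calc (PySem.Dict.ofList test_data).items.foldl
            (fun b kv =>
              if pvIsValidCheck kv.2 && PySem.Str.isIn ("{" ++ kv.1 ++ "}") b then
                PySem.Str.replace b ("{" ++ kv.1 ++ "}") kv.2
              else b) u
          = String.ofList ((PySem.Dict.ofList test_data).items.foldl
            (fun b kv =>
              if pvIsValidCheck kv.2 && PySem.Str.isIn ("{" ++ kv.1 ++ "}") b then
                PySem.Str.replace b ("{" ++ kv.1 ++ "}") kv.2
              else b) u).toList := by simp
        _ = String.ofList (pvScanSub (PySem.Dict.ofList test_data) u.toList) := by rw [h1, hs]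
    by_cases hop : '{' ∈ u.toList
    · have hwf := pvWF_parse u.toList hoku
      have hrp := pvRender_parse u.toList
      have hE : ∀ p ∈ (PySem.Dict.ofList test_data).items, pvIsValidCheck p.2 = true →
          pvBraceFree p.1.toList = true ∧
          (('{' :: (p.1.toList ++ ['}'])) <:+: u.toList → pvBraceFree p.2.toList = true) := by
        intro p hp hv
        obtain ⟨h1', h2'⟩ := halls p (pvItems_sub test_data p hp) hv
        refine ⟨h1' hop, fun hinf => h2' ?_⟩
        rw [PySem.Str.isIn_eq]
        apply (PySem.Chars.isIn_iff_infix _ _).mpr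
        have hpat : ("{" ++ p.1 ++ "}").toList = '{' :: (p.1.toList ++ ['}']) := by
          simp [String.toList_append]
        rw [hpat]
        exact hinf
      have hS : ∀ k : List Char, PvSeg.span k ∈ pvParse u.toList →
          ('{' :: (k ++ ['}'])) <:+: u.toList := by
        intro k hk
        have := pvMem_render_infix _ (pvParse u.toList) hk
        rw [hrp] at this
        simpa [pvRenderSeg] using this
      have hfold := pvFold u.toList (PySem.Dict.ofList test_data).items (pvParse u.toList) hwf hE hS
      have hscan := pvScan_render (PySem.Dict.ofList test_data) (pvParse u.toList) hwf
      have hres : (pvParse u.toList).map (pvResolveSeg (PySem.Dict.ofList test_data).items) =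
          (pvParse u.toList).map (pvResolveSegD (PySem.Dict.ofList test_data)) :=
        List.map_congr_left (fun g _ => pvResolve_items _
          (by simpa [PySem.Dict.keys] using PySem.Dict.nodup_keys_ofList test_data) g)
      calc (PySem.Dict.ofList test_data).items.foldl pvStepL u.toList
          = (PySem.Dict.ofList test_data).items.foldl pvStepL (pvRender (pvParse u.toList)) := by
            rw [hrp]
        _ = pvRender ((pvParse u.toList).map (pvResolveSeg (PySem.Dict.ofList test_data).items)) :=
            hfold
        _ = pvRender ((pvParse u.toList).map (pvResolveSegD (PySem.Dict.ofList test_data))) := by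
            rw [hres]
        _ = pvScanSub (PySem.Dict.ofList test_data) (pvRender (pvParse u.toList)) := hscan.symm
        _ = pvScanSub (PySem.Dict.ofList test_data) u.toList := by rw [hrp]
    · rw [pvFold_no_open _ u.toList hop]
      have := pvScan_txt (PySem.Dict.ofList test_data) u.toList [] hop
      simp only [List.append_nil] at this
      rw [this]
      simp [pvScanSub]
  exact congrArg (fun x => PySem.Str.replace (PySem.Str.replace (PySem.Str.replace x "://" "TEMP_PLACEHOLDER") "//" "/") "TEMP_PLACEHOLDER" "://")
    (key (pvEffUrl base_url environment) hok hall)
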